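-- pv_equiv track=rewrite | github.com/devenkalra/monorepo | apps/json_db/find_book_details.py | pick_isbn
-- ===== SOURCE A (Python) =====
-- from typing import Optional, Dict, Any, Tuple, List
--
-- def pick_isbn(identifiers: List[Dict[str, Any]]) -> Tuple[Optional[str], Optional[str]]:
--     """
--     Given Google Books industryIdentifiers list, pick ISBN-13 if available,
--     otherwise ISBN-10 if available.
--     Returns (isbn13, isbn10).
--     """
--     isbn13 = None
--     isbn10 = None
--     for ident in identifiers or []:
--         t = ident.get("type", "")
--         v = ident.get("identifier")
--         if t == "ISBN_13" and v:
--             isbn13 = v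
--         elif t == "ISBN_10" and v:
--             isbn10 = v
--     return isbn13, isbn10
-- ===== SOURCE B (Python) =====
-- def pick_isbn(identifiers):
--     """
--     Given Google Books industryIdentifiers list, pick ISBN-13 if available,
--     otherwise ISBN-10 if available.
--     Returns (isbn13, isbn10).
--     """
--     ids = list(identifiers or [])
--
--     def last(t):
--         # last truthy identifier of type t = first match scanning backwards
--         return next((d.get("identifier") for d in reversed(ids)
--                      if d.get("type", "") == t and d.get("identifier")), None)
--
--     return (last("ISBN_13"), last("ISBN_10"))
-- ===== Notes on version B (the rewrite author's own statement) =====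
-- stated objective: alternative
-- what changed: Instead of one forward fold keeping last-truthy-wins state in accumulators, B does two stateless staged searches: for each wanted type it scans the reversed list and returns the first (i.e. last) truthy identifier of that type.
import Mathlib
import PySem

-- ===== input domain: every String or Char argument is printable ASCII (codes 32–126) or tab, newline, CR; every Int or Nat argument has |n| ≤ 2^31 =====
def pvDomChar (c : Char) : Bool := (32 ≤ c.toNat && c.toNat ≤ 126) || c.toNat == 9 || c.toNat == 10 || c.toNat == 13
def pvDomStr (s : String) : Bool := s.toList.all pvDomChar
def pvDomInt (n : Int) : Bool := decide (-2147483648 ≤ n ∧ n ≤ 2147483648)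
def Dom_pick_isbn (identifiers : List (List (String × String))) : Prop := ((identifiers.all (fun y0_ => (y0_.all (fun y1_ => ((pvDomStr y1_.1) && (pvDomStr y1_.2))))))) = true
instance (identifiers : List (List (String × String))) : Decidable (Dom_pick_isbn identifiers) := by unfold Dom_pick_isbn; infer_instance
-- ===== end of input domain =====

-- B replaces the stateful forward fold (two accumulators, last-truthy-wins) by two stateless
-- searches over the reversed list, taking the first truthy identifier of each wanted type.

-- dict.get on an association list in insertion order: first match
def pvLookup (d : List (String × String)) (k : String) : Option String :=
  (d.find? (fun p => p.1 == k)).map (fun p => p.2)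

-- ===== PORT A =====
-- one iteration of A's for-loop body over the pair of accumulators (isbn13, isbn10)
def pickStepA (s : Option String × Option String) (ident : List (String × String)) :
    Option String × Option String :=
  let t := (pvLookup ident "type").getD ""
  let v := pvLookup ident "identifier"
  if t == "ISBN_13" && v.getD "" != "" then (v, s.2)
  else if t == "ISBN_10" && v.getD "" != "" then (s.1, v)
  else s

def pick_isbn (identifiers : List (List (String × String))) : Option String × Option String :=
  identifiers.foldl pickStepA (none, none)

-- ===== PORT B =====
-- the generator's filter condition: d.get("type","") == t and d.get("identifier")
def pvMatches (t : String) (x : List (String × String)) : Bool :=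
  ((pvLookup x "type").getD "" == t) && ((pvLookup x "identifier").getD "" != "")

-- next((d.get("identifier") for d in reversed(ids) if pvMatches t d), None)
def pvLast (ids : List (List (String × String))) (t : String) : Option String :=
  ids.reverse.findSome? (fun x => if pvMatches t x then pvLookup x "identifier" else none)

def pick_isbn_alt (identifiers : List (List (String × String))) : Option String × Option String :=
  (pvLast identifiers "ISBN_13", pvLast identifiers "ISBN_10")

-- ===== PRECONDITION & SPEC =====
def Spec_pick_isbn (identifiers : List (List (String × String))) (out : Option String × Option String) : Prop := out = pick_isbn_alt identifiers
instance (identifiers : List (List (String × String))) (out : Option String × Option String) : Decidable (Spec_pick_isbn identifiers out) := by unfold Spec_pick_isbn; infer_instance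

-- ===== CLAIM (what is proved, stated in full; the proofs are below) =====
def Claim_equal_pick_isbn : Prop := ∀ (identifiers : List (List (String × String))), Dom_pick_isbn identifiers → Spec_pick_isbn identifiers (pick_isbn identifiers)

-- ===== LEMMAS AND PROOFS =====

-- A's loop step, characterised via the same filter condition B uses
theorem pickStepA_char (s : Option String × Option String) (x : List (String × String)) :
    pickStepA s x =
      ((if pvMatches "ISBN_13" x then pvLookup x "identifier" else none).or s.1,
       (if pvMatches "ISBN_10" x then pvLookup x "identifier" else none).or s.2) := by
  unfold pickStepA pvMatches
  cases hv : pvLookup x "identifier" with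
  | none => simp
  | some w =>
    by_cases hw : w = ""
    · subst hw; simp
    · have hwb : (w != "") = true := by simpa using hw
      simp only [Option.getD_some, hwb, Bool.and_true]
      by_cases h13 : (pvLookup x "type").getD "" = "ISBN_13"
      · rw [h13]; simp
      · have h13b : (((pvLookup x "type").getD "" == "ISBN_13") = false) := by simpa using h13
        simp only [h13b, Bool.false_eq_true, if_false]
        by_cases h10 : (pvLookup x "type").getD "" = "ISBN_10"
        · rw [h10]; simp
        · have h10b : (((pvLookup x "type").getD "" == "ISBN_10") = false) := by simpa using h10
          simp [h10b]

-- pvLast on a cons: search the tail's reverse first, then the head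
theorem pvLast_cons (x : List (String × String)) (xs : List (List (String × String))) (t : String) :
    pvLast (x :: xs) t = (pvLast xs t).or (if pvMatches t x then pvLookup x "identifier" else none) := by
  unfold pvLast
  simp [List.findSome?_append]

-- loop characterisation: A's fold from any state equals B's backward searches or'ed with the state
theorem foldA_char (l : List (List (String × String))) (s : Option String × Option String) :
    l.foldl pickStepA s = ((pvLast l "ISBN_13").or s.1, (pvLast l "ISBN_10").or s.2) := by
  induction l generalizing s with
  | nil => simp [pvLast]
  | cons x xs ih =>
    simp only [List.foldl_cons, ih, pickStepA_char, pvLast_cons, Option.or_assoc]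

-- ===== VERDICT (by name: the statement is the Claim_ definition above) =====
theorem pick_isbn_spec : Claim_equal_pick_isbn := by
  intro identifiers _
  unfold Spec_pick_isbn pick_isbn pick_isbn_alt
  simp [foldA_char]
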